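-- pv_equiv track=rewrite | github.com/Stannie04/mgaia3 | WFCGenerator/helper.py | compute_tile_adjacency
-- ===== SOURCE A (Python) =====
-- def compute_tile_adjacency(maps):
--     """
--     Compute sets of adjacent tile pairs in each of
--     four cardinal directions across all training maps.
--     """
--     tile_adj = {d: set() for d in range(4)}
--     for map_data in maps:
--         H, W = len(map_data), len(map_data[0])
--         for y in range(H):
--             for x in range(W):
--                 t1 = map_data[y][x]
--                 for d, (dx, dy) in enumerate([(0, -1), (1, 0), (0, 1), (-1, 0)]):
--                     nx, ny = x + dx, y + dy
--                     if 0 <= nx < W and 0 <= ny < H: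
--                         t2 = map_data[ny][nx]
--                         tile_adj[d].add((t1, t2))
--
--     return tile_adj
-- ===== SOURCE B (Python) =====
-- def compute_tile_adjacency(maps):
--     """
--     Compute sets of adjacent tile pairs in each of
--     four cardinal directions across all training maps.
--     """
--     tile_adj = {d: set() for d in range(4)}
--     for map_data in maps:
--         H, W = len(map_data), len(map_data[0])
--         # horizontal pass: right (d=1) and left (d=3)
--         for y in range(H):
--             for x in range(W - 1):
--                 a, b = map_data[y][x], map_data[y][x + 1]
--                 tile_adj[1].add((a, b))
--                 tile_adj[3].add((b, a))
--         # vertical pass: down (d=2) and up (d=0)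
--         for y in range(H - 1):
--             for x in range(W):
--                 a, b = map_data[y][x], map_data[y + 1][x]
--                 tile_adj[2].add((a, b))
--                 tile_adj[0].add((b, a))
--     return tile_adj
-- ===== Notes on version B (the rewrite author's own statement) =====
-- stated objective: alternative
-- what changed: Replaces A's per-cell loop over four (dx,dy) neighbour offsets with in-bounds checks by two axis-oriented passes (a horizontal pass filling the right/left sets, a vertical pass filling the down/up sets) over explicit adjacent-pair index ranges with no bounds checks.
import Mathlib
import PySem

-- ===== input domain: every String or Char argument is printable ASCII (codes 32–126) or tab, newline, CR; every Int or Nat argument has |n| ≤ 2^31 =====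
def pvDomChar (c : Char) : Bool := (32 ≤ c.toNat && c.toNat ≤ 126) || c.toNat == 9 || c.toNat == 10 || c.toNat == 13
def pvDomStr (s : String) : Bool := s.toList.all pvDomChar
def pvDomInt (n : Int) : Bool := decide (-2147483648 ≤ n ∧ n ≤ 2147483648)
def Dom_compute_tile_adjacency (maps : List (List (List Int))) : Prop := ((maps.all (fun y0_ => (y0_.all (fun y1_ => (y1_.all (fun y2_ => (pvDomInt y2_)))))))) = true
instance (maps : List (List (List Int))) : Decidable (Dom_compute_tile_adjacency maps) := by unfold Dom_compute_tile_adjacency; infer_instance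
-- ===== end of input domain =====

-- B replaces A's per-cell 4-direction neighbour loop (with bounds checks) by two axis-oriented
-- passes over adjacent pairs; equivalence of the returned dict is proved on all maps where A
-- does not raise (objective: alternative decomposition).

-- map_data[y][x] (indices in range under Pre_; out of range the default is never what A returns)
def pvTile (m : List (List Int)) (y x : Int) : Int :=
  PySem.List.pyGetD (PySem.List.pyGetD m y []) x 0

-- ===== PORT A =====
-- the dict {d: set() for d in range(4)}
def pvInitAdj : PySem.Dict Int (PySem.Set (Int × Int)) :=
  (PySem.List.pyRange 0 4 1).foldl (fun ta k => ta.insert k (PySem.Set.ofList [])) PySem.Dict.empty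

-- the innermost 'for d, (dx, dy) in enumerate(...)' loop of A, at cell (y, x)
def aCell (m : List (List Int)) (W H y x : Int)
    (ta : PySem.Dict Int (PySem.Set (Int × Int))) : PySem.Dict Int (PySem.Set (Int × Int)) :=
  (PySem.List.enumerate [((0:Int), (-1:Int)), (1, 0), (0, 1), (-1, 0)] 0).foldl
    (fun ta p =>
      if 0 ≤ x + p.2.1 ∧ x + p.2.1 < W ∧ 0 ≤ y + p.2.2 ∧ y + p.2.2 < H then
        ta.modify p.1 (PySem.Set.ofList [])
          (fun s => s.add (pvTile m y x, pvTile m (y + p.2.2) (x + p.2.1)))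
      else ta)
    ta

-- A's 'for map_data in maps' body: the y/x double loop over all cells
def aMap (ta : PySem.Dict Int (PySem.Set (Int × Int))) (m : List (List Int)) :
    PySem.Dict Int (PySem.Set (Int × Int)) :=
  let H : Int := m.length
  let W : Int := (PySem.List.pyGetD m 0 []).length
  (PySem.List.pyRange 0 H 1).foldl (fun ta y =>
    (PySem.List.pyRange 0 W 1).foldl (fun ta x => aCell m W H y x ta) ta) ta

def compute_tile_adjacency (maps : List (List (List Int))) : List (Int × List (Int × Int)) :=
  (maps.foldl aMap pvInitAdj).items

-- ===== PORT B =====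
-- B's horizontal pass of one map: right pairs into key 1, reversed pairs into key 3
def bPassH (m : List (List Int)) (W H : Int)
    (ta : PySem.Dict Int (PySem.Set (Int × Int))) : PySem.Dict Int (PySem.Set (Int × Int)) :=
  (PySem.List.pyRange 0 H 1).foldl (fun ta y =>
    (PySem.List.pyRange 0 (W - 1) 1).foldl (fun ta x =>
      (ta.modify 1 (PySem.Set.ofList []) (fun s => s.add (pvTile m y x, pvTile m y (x + 1)))).modify
        3 (PySem.Set.ofList []) (fun s => s.add (pvTile m y (x + 1), pvTile m y x))) ta) ta

-- B's vertical pass of one map: down pairs into key 2, reversed pairs into key 0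
def bPassV (m : List (List Int)) (W H : Int)
    (ta : PySem.Dict Int (PySem.Set (Int × Int))) : PySem.Dict Int (PySem.Set (Int × Int)) :=
  (PySem.List.pyRange 0 (H - 1) 1).foldl (fun ta y =>
    (PySem.List.pyRange 0 W 1).foldl (fun ta x =>
      (ta.modify 2 (PySem.Set.ofList []) (fun s => s.add (pvTile m y x, pvTile m (y + 1) x))).modify
        0 (PySem.Set.ofList []) (fun s => s.add (pvTile m (y + 1) x, pvTile m y x))) ta) ta

def bMap (ta : PySem.Dict Int (PySem.Set (Int × Int))) (m : List (List Int)) :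
    PySem.Dict Int (PySem.Set (Int × Int)) :=
  let H : Int := m.length
  let W : Int := (PySem.List.pyGetD m 0 []).length
  bPassV m W H (bPassH m W H ta)

def compute_tile_adjacency_alt (maps : List (List (List Int))) : List (Int × List (Int × Int)) :=
  (maps.foldl bMap pvInitAdj).items

-- ===== PRECONDITION & SPEC =====
-- Pre_ excludes exactly the inputs where the Python A raises IndexError: a map with no rows
-- (map_data[0]), or a row shorter than row 0 (map_data[ny][nx] with nx < W = len(map_data[0])).
def Pre_compute_tile_adjacency (maps : List (List (List Int))) : Prop :=
  ∀ m ∈ maps, m ≠ [] ∧ ∀ row ∈ m, (m.headD []).length ≤ row.length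
instance (maps : List (List (List Int))) : Decidable (Pre_compute_tile_adjacency maps) := by
  unfold Pre_compute_tile_adjacency; infer_instance

def pvWitness_compute_tile_adjacency : List (List (List Int)) := [[[1, 2], [3, 1]], [[5]]]

def Spec_compute_tile_adjacency (maps : List (List (List Int))) (out : List (Int × List (Int × Int))) : Prop := out = compute_tile_adjacency_alt maps
instance (maps : List (List (List Int))) (out : List (Int × List (Int × Int))) : Decidable (Spec_compute_tile_adjacency maps out) := by unfold Spec_compute_tile_adjacency; infer_instance

-- ===== CLAIM (what is proved, stated in full; the proofs are below) =====
def Claim_equal_compute_tile_adjacency : Prop := ∀ (maps : List (List (List Int))), Dom_compute_tile_adjacency maps → Pre_compute_tile_adjacency maps → Spec_compute_tile_adjacency maps (compute_tile_adjacency maps)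

-- ===== LEMMAS AND PROOFS =====

-- the 4-key dict as a function of its four sets
def D4 (a b c d : PySem.Set (Int × Int)) : PySem.Dict Int (PySem.Set (Int × Int)) :=
  ⟨[(0, a), (1, b), (2, c), (3, d)]⟩

theorem pvInitAdj_eq : pvInitAdj = D4 [] [] [] [] := by decide

-- a fold whose step acts componentwise on D4 is the D4 of the componentwise folds
theorem foldl_D4 {α : Type} (F : PySem.Dict Int (PySem.Set (Int × Int)) → α → PySem.Dict Int (PySem.Set (Int × Int)))
    (g0 g1 g2 g3 : PySem.Set (Int × Int) → α → PySem.Set (Int × Int))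
    (h : ∀ a b c d x, F (D4 a b c d) x = D4 (g0 a x) (g1 b x) (g2 c x) (g3 d x)) :
    ∀ (l : List α) (a b c d : PySem.Set (Int × Int)),
      l.foldl F (D4 a b c d) = D4 (l.foldl g0 a) (l.foldl g1 b) (l.foldl g2 c) (l.foldl g3 d) := by
  intro l
  induction l with
  | nil => intro a b c d; rfl
  | cons x t ih =>
    intro a b c d
    simp only [List.foldl_cons, h]
    exact ih _ _ _ _

-- 'for i in range(n): if i < n-1: …' is 'for i in range(n-1): …'
theorem foldl_trim {S : Type} (n : Int) (G : S → Int → S) (s : S) :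
    (PySem.List.pyRange 0 n 1).foldl (fun a y => if y < n - 1 then G a y else a) s
      = (PySem.List.pyRange 0 (n - 1) 1).foldl G s := by
  by_cases h : n ≤ 0
  · rw [PySem.List.pyRange_one_eq_nil (by omega), PySem.List.pyRange_one_eq_nil (by omega)]
    rfl
  · rw [not_le] at h
    rw [PySem.List.pyRange_one_append 0 (n - 1) n (by omega) (by omega), List.foldl_append,
      PySem.List.pyRange_one_cons (show n - 1 < n by omega),
      PySem.List.pyRange_one_eq_nil (by omega : n ≤ n - 1 + 1)]
    simp only [List.foldl_cons, List.foldl_nil]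
    rw [if_neg (lt_irrefl (n - 1))]
    exact PySem.List.foldl_congr_mem _ _ _ _ (by
      intro a y hy
      rw [PySem.List.mem_pyRange_one] at hy
      rw [if_pos (show y < n - 1 from hy.2)])

-- 'for i in range(n): if 1 <= i: …(i)' is 'for i in range(n-1): …(i+1)'
theorem foldl_drop1 {S : Type} (n : Int) (G : S → Int → S) (s : S) :
    (PySem.List.pyRange 0 n 1).foldl (fun a y => if 1 ≤ y then G a y else a) s
      = (PySem.List.pyRange 0 (n - 1) 1).foldl (fun a y => G a (y + 1)) s := by
  by_cases h : n ≤ 0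
  · rw [PySem.List.pyRange_one_eq_nil (by omega), PySem.List.pyRange_one_eq_nil (by omega)]
    rfl
  · rw [not_le] at h
    rw [PySem.List.pyRange_one_cons (show (0:Int) < n by omega)]
    simp only [List.foldl_cons]
    rw [if_neg (by omega)]
    have step : List.foldl (fun a y => if 1 ≤ y then G a y else a) s (PySem.List.pyRange (0 + 1) n 1)
        = List.foldl G s (PySem.List.pyRange (0 + 1) n 1) :=
      PySem.List.foldl_congr_mem _ _ _ _ (by
        intro a y hy
        rw [PySem.List.mem_pyRange_one] at hy
        rw [if_pos (show (1:Int) ≤ y by omega)])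
    rw [step, PySem.List.pyRange_one (0 + 1) n, PySem.List.pyRange_one 0 (n - 1),
      List.foldl_map, List.foldl_map]
    rw [show (n - (0 + 1)).toNat = (n - 1 - 0).toNat by omega]
    apply PySem.List.foldl_congr_mem
    intro a k _
    rw [show (0:Int) + 1 + (k : Int) = 0 + (k : Int) + 1 by ring]


-- component-level step functions of A's cell loop (one per direction key)
def g0cell (m : List (List Int)) (W H y : Int) : PySem.Set (Int × Int) → Int → PySem.Set (Int × Int) :=
  fun s x => if 0 ≤ x + 0 ∧ x + 0 < W ∧ 0 ≤ y + -1 ∧ y + -1 < H then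
    s.add (pvTile m y x, pvTile m (y + -1) (x + 0)) else s
def g1cell (m : List (List Int)) (W H y : Int) : PySem.Set (Int × Int) → Int → PySem.Set (Int × Int) :=
  fun s x => if 0 ≤ x + 1 ∧ x + 1 < W ∧ 0 ≤ y + 0 ∧ y + 0 < H then
    s.add (pvTile m y x, pvTile m (y + 0) (x + 1)) else s
def g2cell (m : List (List Int)) (W H y : Int) : PySem.Set (Int × Int) → Int → PySem.Set (Int × Int) :=
  fun s x => if 0 ≤ x + 0 ∧ x + 0 < W ∧ 0 ≤ y + 1 ∧ y + 1 < H then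
    s.add (pvTile m y x, pvTile m (y + 1) (x + 0)) else s
def g3cell (m : List (List Int)) (W H y : Int) : PySem.Set (Int × Int) → Int → PySem.Set (Int × Int) :=
  fun s x => if 0 ≤ x + -1 ∧ x + -1 < W ∧ 0 ≤ y + 0 ∧ y + 0 < H then
    s.add (pvTile m y x, pvTile m (y + 0) (x + -1)) else s

def aRow0 (m : List (List Int)) (W H : Int) : PySem.Set (Int × Int) → Int → PySem.Set (Int × Int) :=
  fun a y => (PySem.List.pyRange 0 W 1).foldl (g0cell m W H y) a
def aRow1 (m : List (List Int)) (W H : Int) : PySem.Set (Int × Int) → Int → PySem.Set (Int × Int) :=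
  fun a y => (PySem.List.pyRange 0 W 1).foldl (g1cell m W H y) a
def aRow2 (m : List (List Int)) (W H : Int) : PySem.Set (Int × Int) → Int → PySem.Set (Int × Int) :=
  fun a y => (PySem.List.pyRange 0 W 1).foldl (g2cell m W H y) a
def aRow3 (m : List (List Int)) (W H : Int) : PySem.Set (Int × Int) → Int → PySem.Set (Int × Int) :=
  fun a y => (PySem.List.pyRange 0 W 1).foldl (g3cell m W H y) a

def aMapC0 : PySem.Set (Int × Int) → List (List Int) → PySem.Set (Int × Int) :=
  fun a m => (PySem.List.pyRange 0 (m.length : Int) 1).foldl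
    (aRow0 m ((PySem.List.pyGetD m 0 []).length : Int) (m.length : Int)) a
def aMapC1 : PySem.Set (Int × Int) → List (List Int) → PySem.Set (Int × Int) :=
  fun a m => (PySem.List.pyRange 0 (m.length : Int) 1).foldl
    (aRow1 m ((PySem.List.pyGetD m 0 []).length : Int) (m.length : Int)) a
def aMapC2 : PySem.Set (Int × Int) → List (List Int) → PySem.Set (Int × Int) :=
  fun a m => (PySem.List.pyRange 0 (m.length : Int) 1).foldl
    (aRow2 m ((PySem.List.pyGetD m 0 []).length : Int) (m.length : Int)) a
def aMapC3 : PySem.Set (Int × Int) → List (List Int) → PySem.Set (Int × Int) :=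
  fun a m => (PySem.List.pyRange 0 (m.length : Int) 1).foldl
    (aRow3 m ((PySem.List.pyGetD m 0 []).length : Int) (m.length : Int)) a

theorem aCell_D4 (m : List (List Int)) (W H y x : Int) (a b c d : PySem.Set (Int × Int)) :
    aCell m W H y x (D4 a b c d)
      = D4 (g0cell m W H y a x) (g1cell m W H y b x) (g2cell m W H y c x) (g3cell m W H y d x) := by
  unfold aCell g0cell g1cell g2cell g3cell
  simp only [PySem.List.enumerate_cons, PySem.List.enumerate_nil, List.foldl_cons, List.foldl_nil]
  split_ifs <;> rfl

theorem aRow_D4 (m : List (List Int)) (W H y : Int) (a b c d : PySem.Set (Int × Int)) :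
    (PySem.List.pyRange 0 W 1).foldl (fun ta x => aCell m W H y x ta) (D4 a b c d)
      = D4 (aRow0 m W H a y) (aRow1 m W H b y) (aRow2 m W H c y) (aRow3 m W H d y) :=
  foldl_D4 _ (g0cell m W H y) (g1cell m W H y) (g2cell m W H y) (g3cell m W H y)
    (fun a b c d x => aCell_D4 m W H y x a b c d) _ a b c d

theorem aMap_D4 (m : List (List Int)) (a b c d : PySem.Set (Int × Int)) :
    aMap (D4 a b c d) m = D4 (aMapC0 a m) (aMapC1 b m) (aMapC2 c m) (aMapC3 d m) := by
  unfold aMap aMapC0 aMapC1 aMapC2 aMapC3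
  exact foldl_D4 _ (aRow0 m _ _) (aRow1 m _ _) (aRow2 m _ _) (aRow3 m _ _)
    (fun a b c d y => aRow_D4 m _ _ y a b c d) _ a b c d

theorem aFold_D4 (maps : List (List (List Int))) (a b c d : PySem.Set (Int × Int)) :
    maps.foldl aMap (D4 a b c d)
      = D4 (maps.foldl aMapC0 a) (maps.foldl aMapC1 b) (maps.foldl aMapC2 c) (maps.foldl aMapC3 d) :=
  foldl_D4 aMap aMapC0 aMapC1 aMapC2 aMapC3 (fun a b c d m => aMap_D4 m a b c d) maps a b c d

-- B's component functions
def bRow1 (m : List (List Int)) (W : Int) : PySem.Set (Int × Int) → Int → PySem.Set (Int × Int) :=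
  fun b y => (PySem.List.pyRange 0 (W - 1) 1).foldl
    (fun s x => s.add (pvTile m y x, pvTile m y (x + 1))) b
def bRow3 (m : List (List Int)) (W : Int) : PySem.Set (Int × Int) → Int → PySem.Set (Int × Int) :=
  fun d y => (PySem.List.pyRange 0 (W - 1) 1).foldl
    (fun s x => s.add (pvTile m y (x + 1), pvTile m y x)) d
def bRow2 (m : List (List Int)) (W : Int) : PySem.Set (Int × Int) → Int → PySem.Set (Int × Int) :=
  fun c y => (PySem.List.pyRange 0 W 1).foldl
    (fun s x => s.add (pvTile m y x, pvTile m (y + 1) x)) c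
def bRow0 (m : List (List Int)) (W : Int) : PySem.Set (Int × Int) → Int → PySem.Set (Int × Int) :=
  fun a y => (PySem.List.pyRange 0 W 1).foldl
    (fun s x => s.add (pvTile m (y + 1) x, pvTile m y x)) a

def bMapC0 : PySem.Set (Int × Int) → List (List Int) → PySem.Set (Int × Int) :=
  fun a m => (PySem.List.pyRange 0 ((m.length : Int) - 1) 1).foldl
    (bRow0 m ((PySem.List.pyGetD m 0 []).length : Int)) a
def bMapC1 : PySem.Set (Int × Int) → List (List Int) → PySem.Set (Int × Int) :=
  fun b m => (PySem.List.pyRange 0 (m.length : Int) 1).foldl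
    (bRow1 m ((PySem.List.pyGetD m 0 []).length : Int)) b
def bMapC2 : PySem.Set (Int × Int) → List (List Int) → PySem.Set (Int × Int) :=
  fun c m => (PySem.List.pyRange 0 ((m.length : Int) - 1) 1).foldl
    (bRow2 m ((PySem.List.pyGetD m 0 []).length : Int)) c
def bMapC3 : PySem.Set (Int × Int) → List (List Int) → PySem.Set (Int × Int) :=
  fun d m => (PySem.List.pyRange 0 (m.length : Int) 1).foldl
    (bRow3 m ((PySem.List.pyGetD m 0 []).length : Int)) d

theorem bPassH_D4 (m : List (List Int)) (W H : Int) (a b c d : PySem.Set (Int × Int)) :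
    bPassH m W H (D4 a b c d)
      = D4 a ((PySem.List.pyRange 0 H 1).foldl (bRow1 m W) b) c
          ((PySem.List.pyRange 0 H 1).foldl (bRow3 m W) d) := by
  unfold bPassH
  have hrow : ∀ (y : Int) (a b c d : PySem.Set (Int × Int)),
      (PySem.List.pyRange 0 (W - 1) 1).foldl
        (fun ta x =>
          (ta.modify 1 (PySem.Set.ofList []) (fun s => s.add (pvTile m y x, pvTile m y (x + 1)))).modify
            3 (PySem.Set.ofList []) (fun s => s.add (pvTile m y (x + 1), pvTile m y x))) (D4 a b c d)
        = D4 a (bRow1 m W b y) c (bRow3 m W d y) := by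
    intro y a b c d
    unfold bRow1 bRow3
    refine (foldl_D4
      (fun ta x =>
        (ta.modify 1 (PySem.Set.ofList []) (fun s => s.add (pvTile m y x, pvTile m y (x + 1)))).modify
          3 (PySem.Set.ofList []) (fun s => s.add (pvTile m y (x + 1), pvTile m y x)))
      (fun s _ => s) (fun s x => s.add (pvTile m y x, pvTile m y (x + 1)))
      (fun s _ => s) (fun s x => s.add (pvTile m y (x + 1), pvTile m y x))
      (fun a b c d x => rfl) _ a b c d).trans ?_
    rw [List.foldl_fixed, List.foldl_fixed]
  refine (foldl_D4 _ (fun a _ => a) (bRow1 m W) (fun c _ => c) (bRow3 m W)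
    (fun a b c d y => hrow y a b c d) _ a b c d).trans ?_
  rw [List.foldl_fixed, List.foldl_fixed]

theorem bPassV_D4 (m : List (List Int)) (W H : Int) (a b c d : PySem.Set (Int × Int)) :
    bPassV m W H (D4 a b c d)
      = D4 ((PySem.List.pyRange 0 (H - 1) 1).foldl (bRow0 m W) a) b
          ((PySem.List.pyRange 0 (H - 1) 1).foldl (bRow2 m W) c) d := by
  unfold bPassV
  have hrow : ∀ (y : Int) (a b c d : PySem.Set (Int × Int)),
      (PySem.List.pyRange 0 W 1).foldl
        (fun ta x =>
          (ta.modify 2 (PySem.Set.ofList []) (fun s => s.add (pvTile m y x, pvTile m (y + 1) x))).modify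
            0 (PySem.Set.ofList []) (fun s => s.add (pvTile m (y + 1) x, pvTile m y x))) (D4 a b c d)
        = D4 (bRow0 m W a y) b (bRow2 m W c y) d := by
    intro y a b c d
    unfold bRow0 bRow2
    refine (foldl_D4
      (fun ta x =>
        (ta.modify 2 (PySem.Set.ofList []) (fun s => s.add (pvTile m y x, pvTile m (y + 1) x))).modify
          0 (PySem.Set.ofList []) (fun s => s.add (pvTile m (y + 1) x, pvTile m y x)))
      (fun s x => s.add (pvTile m (y + 1) x, pvTile m y x)) (fun s _ => s)
      (fun s x => s.add (pvTile m y x, pvTile m (y + 1) x)) (fun s _ => s)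
      (fun a b c d x => rfl) _ a b c d).trans ?_
    rw [List.foldl_fixed, List.foldl_fixed]
  refine (foldl_D4 _ (bRow0 m W) (fun b _ => b) (bRow2 m W) (fun d _ => d)
    (fun a b c d y => hrow y a b c d) _ a b c d).trans ?_
  rw [List.foldl_fixed, List.foldl_fixed]

theorem bMap_D4 (m : List (List Int)) (a b c d : PySem.Set (Int × Int)) :
    bMap (D4 a b c d) m = D4 (bMapC0 a m) (bMapC1 b m) (bMapC2 c m) (bMapC3 d m) := by
  have h : bMap (D4 a b c d) m
      = bPassV m ((PySem.List.pyGetD m 0 []).length : Int) (m.length : Int)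
          (bPassH m ((PySem.List.pyGetD m 0 []).length : Int) (m.length : Int) (D4 a b c d)) := rfl
  rw [h, bPassH_D4, bPassV_D4]
  rfl

theorem bFold_D4 (maps : List (List (List Int))) (a b c d : PySem.Set (Int × Int)) :
    maps.foldl bMap (D4 a b c d)
      = D4 (maps.foldl bMapC0 a) (maps.foldl bMapC1 b) (maps.foldl bMapC2 c) (maps.foldl bMapC3 d) :=
  foldl_D4 bMap bMapC0 bMapC1 bMapC2 bMapC3 (fun a b c d m => bMap_D4 m a b c d) maps a b c d

-- the four per-direction computations agree map by map
theorem comp1_fun : aMapC1 = bMapC1 := by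
  funext a m
  unfold aMapC1 bMapC1
  apply PySem.List.foldl_congr_mem
  intro a y hy
  rw [PySem.List.mem_pyRange_one] at hy
  unfold aRow1 bRow1
  have h1 : (PySem.List.pyRange 0 ((PySem.List.pyGetD m 0 []).length : Int) 1).foldl
      (g1cell m ((PySem.List.pyGetD m 0 []).length : Int) (m.length : Int) y) a
      = (PySem.List.pyRange 0 ((PySem.List.pyGetD m 0 []).length : Int) 1).foldl
        (fun s x => if x < ((PySem.List.pyGetD m 0 []).length : Int) - 1 then
          s.add (pvTile m y x, pvTile m y (x + 1)) else s) a := by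
    apply PySem.List.foldl_congr_mem
    intro s x hx
    rw [PySem.List.mem_pyRange_one] at hx
    unfold g1cell
    by_cases hc : x < ((PySem.List.pyGetD m 0 []).length : Int) - 1
    · rw [if_pos (by omega), if_pos hc, show y + (0:Int) = y from add_zero y]
    · rw [if_neg (by omega), if_neg hc]
  rw [h1]
  exact foldl_trim _ _ a

theorem comp3_fun : aMapC3 = bMapC3 := by
  funext a m
  unfold aMapC3 bMapC3
  apply PySem.List.foldl_congr_mem
  intro a y hy
  rw [PySem.List.mem_pyRange_one] at hy
  unfold aRow3 bRow3
  have h1 : (PySem.List.pyRange 0 ((PySem.List.pyGetD m 0 []).length : Int) 1).foldl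
      (g3cell m ((PySem.List.pyGetD m 0 []).length : Int) (m.length : Int) y) a
      = (PySem.List.pyRange 0 ((PySem.List.pyGetD m 0 []).length : Int) 1).foldl
        (fun s x => if 1 ≤ x then s.add (pvTile m y x, pvTile m y (x + -1)) else s) a := by
    apply PySem.List.foldl_congr_mem
    intro s x hx
    rw [PySem.List.mem_pyRange_one] at hx
    unfold g3cell
    by_cases hc : (1:Int) ≤ x
    · rw [if_pos (by omega), if_pos hc, show y + (0:Int) = y from add_zero y]
    · rw [if_neg (by omega), if_neg hc]
  rw [h1, foldl_drop1]
  apply PySem.List.foldl_congr_mem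
  intro s x _
  rw [show x + 1 + (-1 : Int) = x by ring]

theorem comp2_fun : aMapC2 = bMapC2 := by
  funext a m
  unfold aMapC2 bMapC2
  have h1 : (PySem.List.pyRange 0 (m.length : Int) 1).foldl
      (aRow2 m ((PySem.List.pyGetD m 0 []).length : Int) (m.length : Int)) a
      = (PySem.List.pyRange 0 (m.length : Int) 1).foldl
        (fun a y => if y < (m.length : Int) - 1 then
          bRow2 m ((PySem.List.pyGetD m 0 []).length : Int) a y else a) a := by
    apply PySem.List.foldl_congr_mem
    intro a y hy
    rw [PySem.List.mem_pyRange_one] at hy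
    unfold aRow2 bRow2
    by_cases hc : y < (m.length : Int) - 1
    · rw [if_pos hc]
      apply PySem.List.foldl_congr_mem
      intro s x hx
      rw [PySem.List.mem_pyRange_one] at hx
      unfold g2cell
      rw [if_pos (by omega), show x + (0:Int) = x from add_zero x]
    · rw [if_neg hc]
      have h2 : (PySem.List.pyRange 0 ((PySem.List.pyGetD m 0 []).length : Int) 1).foldl
          (g2cell m ((PySem.List.pyGetD m 0 []).length : Int) (m.length : Int) y) a
          = (PySem.List.pyRange 0 ((PySem.List.pyGetD m 0 []).length : Int) 1).foldl
            (fun (s : PySem.Set (Int × Int)) (_ : Int) => s) a := by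
        apply PySem.List.foldl_congr_mem
        intro s x hx
        unfold g2cell
        rw [if_neg (by omega)]
      rw [h2, List.foldl_fixed]
  rw [h1, foldl_trim]

theorem comp0_fun : aMapC0 = bMapC0 := by
  funext a m
  unfold aMapC0 bMapC0
  have h1 : (PySem.List.pyRange 0 (m.length : Int) 1).foldl
      (aRow0 m ((PySem.List.pyGetD m 0 []).length : Int) (m.length : Int)) a
      = (PySem.List.pyRange 0 (m.length : Int) 1).foldl
        (fun a y => if 1 ≤ y then
          (PySem.List.pyRange 0 ((PySem.List.pyGetD m 0 []).length : Int) 1).foldl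
            (fun s x => s.add (pvTile m y x, pvTile m (y + -1) x)) a else a) a := by
    apply PySem.List.foldl_congr_mem
    intro a y hy
    rw [PySem.List.mem_pyRange_one] at hy
    unfold aRow0
    by_cases hc : (1:Int) ≤ y
    · rw [if_pos hc]
      apply PySem.List.foldl_congr_mem
      intro s x hx
      rw [PySem.List.mem_pyRange_one] at hx
      unfold g0cell
      rw [if_pos (by omega), show x + (0:Int) = x from add_zero x]
    · rw [if_neg hc]
      have h2 : (PySem.List.pyRange 0 ((PySem.List.pyGetD m 0 []).length : Int) 1).foldl
          (g0cell m ((PySem.List.pyGetD m 0 []).length : Int) (m.length : Int) y) a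
          = (PySem.List.pyRange 0 ((PySem.List.pyGetD m 0 []).length : Int) 1).foldl
            (fun (s : PySem.Set (Int × Int)) (_ : Int) => s) a := by
        apply PySem.List.foldl_congr_mem
        intro s x hx
        unfold g0cell
        rw [if_neg (by omega)]
      rw [h2, List.foldl_fixed]
  rw [h1, foldl_drop1]
  apply PySem.List.foldl_congr_mem
  intro a y _
  unfold bRow0
  apply PySem.List.foldl_congr_mem
  intro s x _
  rw [show y + 1 + (-1 : Int) = y by ring]

theorem compute_tile_adjacency_spec : Claim_equal_compute_tile_adjacency := by
  intro maps _ _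
  unfold Spec_compute_tile_adjacency compute_tile_adjacency compute_tile_adjacency_alt
  rw [pvInitAdj_eq, aFold_D4, bFold_D4, comp0_fun, comp1_fun, comp2_fun, comp3_fun]
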